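-- pv_equiv track=rewrite | github.com/yangsenwxy/deepflash | modules/recycle/ImgCropperDIRTY.py | generate_boxes_given_startIdxes
-- ===== SOURCE A (Python) =====
-- def generate_boxes_given_startIdxes(startIdxes, patch_shape):
--     '''
--     @description:
--     @param {type}:
--         startIdxes{list(array)}:list of start index for each patch
--         i.e. [(p1i,p1TLD1,p1TLD2),...]
--         //startIdxes{list(array)}: list of start index in each dimension,
--         //[(p1i,p2i,...),(p1D1startIdx, p2D1startIdx, ...), (p1D2startIdx, p2D2startIdx, ...)]
--             //e.g. [ (1,2,3,4,5...10), (1,3,5, ..., 20) ]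
--     @return:
--         boxes{list(tuple(tuple))}. E.g. [(p1i, p1TL, p1BR), (p2i, l2TL, p2BR),...]
--     '''
--     boxes = []
--     if len(startIdxes[0])-1 == 2:
--         for patchIdx in range(len(startIdxes)):
--             patchIdxi = startIdxes[patchIdx][0]
--             patchIdxDim0 = startIdxes[patchIdx][1]
--             patchIdxDim1 = startIdxes[patchIdx][2]
--             boxes.append((
--                     patchIdxi,
--                     (patchIdxDim0, patchIdxDim1),
--                     (patchIdxDim0 + patch_shape[0], patchIdxDim1 + patch_shape[1])) )
--     elif len(startIdxes[0])-1 == 3: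
--         for patchIdx in range(len(startIdxes)):
--             patchIdxi = startIdxes[patchIdx][0]
--             patchIdxDim0 = startIdxes[patchIdx][1]
--             patchIdxDim1 = startIdxes[patchIdx][2]
--             patchIdxDim2 = startIdxes[patchIdx][3]
--             boxes.append((
--                     patchIdxi,
--                     (patchIdxDim0, patchIdxDim1, patchIdxDim2),
--                     (patchIdxDim0 + patch_shape[0], patchIdxDim1 + patch_shape[1],patchIdxDim2 + patch_shape[2])) )
-- #    if len(startIdxes) == 2:
-- #        for patchIdx0 in startIdxes[0]:
-- #            for patchIdx1 in startIdxes[1]: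
-- #                boxes.append(((patchIdx0, patchIdx1),
-- #                             (patchIdx0 + patch_shape[0], patchIdx1 + patch_shape[1])) )
-- #    elif len(startIdxes) == 3:
-- #        for patchIdx0 in startIdxes[0]:
-- #            for patchIdx1 in startIdxes[1]:
-- #                for patchIdx2 in startIdxes[2]:
-- #                    boxes.append(((patchIdx0, patchIdx1, patchIdx2),
-- #                                 (patchIdx0 + patch_shape[0], patchIdx1 + patch_shape[1], patchIdx2 + patch_shape[2]) ))
--
--     return boxes
-- ===== SOURCE B (Python) =====
-- def generate_boxes_given_startIdxes(startIdxes, patch_shape):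
--     dims = len(startIdxes[0]) - 1
--     if dims not in (2, 3):
--         return []
--     # column-wise: transpose the start-index table, shift each coordinate
--     # column by its patch length, then transpose back and zip the staged lists
--     cols = list(zip(*(row[:dims + 1] for row in startIdxes)))
--     ids = cols[0]
--     tl_cols = cols[1:]
--     br_cols = [tuple(v + patch_shape[d] for v in col) for d, col in enumerate(tl_cols)]
--     tls = list(zip(*tl_cols))
--     brs = list(zip(*br_cols))
--     return list(zip(ids, tls, brs))
-- ===== Notes on version B (the rewrite author's own statement) =====
-- stated objective: alternative
-- what changed: B works column-wise: it transposes the start-index table into coordinate columns, shifts each column by its patch length, transposes back and zips the staged id/TL/BR lists, instead of A's two hardcoded per-row 2D/3D loops that assemble each box element by element.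
import Mathlib
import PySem

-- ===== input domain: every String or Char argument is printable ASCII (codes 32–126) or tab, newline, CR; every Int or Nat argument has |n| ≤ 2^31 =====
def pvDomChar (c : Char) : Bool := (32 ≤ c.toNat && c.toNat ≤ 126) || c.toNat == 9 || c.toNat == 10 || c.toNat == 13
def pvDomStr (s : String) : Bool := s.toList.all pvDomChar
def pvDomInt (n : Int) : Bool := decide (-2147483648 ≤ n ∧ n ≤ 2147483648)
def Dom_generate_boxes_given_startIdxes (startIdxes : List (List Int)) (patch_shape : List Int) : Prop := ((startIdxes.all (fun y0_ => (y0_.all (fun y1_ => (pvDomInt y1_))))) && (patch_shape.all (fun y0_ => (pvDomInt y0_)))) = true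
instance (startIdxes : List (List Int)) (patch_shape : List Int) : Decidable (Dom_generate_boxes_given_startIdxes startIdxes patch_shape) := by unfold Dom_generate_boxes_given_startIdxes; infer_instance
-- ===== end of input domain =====

-- B is a column-wise alternative (transpose the table, shift each column, transpose back) to A's per-row 2D/3D loops; same cost.

-- ===== PORT A =====
def generate_boxes_given_startIdxes (startIdxes : List (List Int)) (patch_shape : List Int) : List (Int × List Int × List Int) :=
  let boxes : List (Int × List Int × List Int) := []
  if PySem.List.len (PySem.List.pyGetD startIdxes 0 []) - 1 = 2 then
    (PySem.List.pyRange 0 (PySem.List.len startIdxes) 1).foldl (fun boxes patchIdx =>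
      let row := PySem.List.pyGetD startIdxes patchIdx []
      let patchIdxi := PySem.List.pyGetD row 0 0
      let patchIdxDim0 := PySem.List.pyGetD row 1 0
      let patchIdxDim1 := PySem.List.pyGetD row 2 0
      boxes ++ [(patchIdxi,
                 [patchIdxDim0, patchIdxDim1],
                 [patchIdxDim0 + PySem.List.pyGetD patch_shape 0 0,
                  patchIdxDim1 + PySem.List.pyGetD patch_shape 1 0])]) boxes
  else if PySem.List.len (PySem.List.pyGetD startIdxes 0 []) - 1 = 3 then
    (PySem.List.pyRange 0 (PySem.List.len startIdxes) 1).foldl (fun boxes patchIdx =>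
      let row := PySem.List.pyGetD startIdxes patchIdx []
      let patchIdxi := PySem.List.pyGetD row 0 0
      let patchIdxDim0 := PySem.List.pyGetD row 1 0
      let patchIdxDim1 := PySem.List.pyGetD row 2 0
      let patchIdxDim2 := PySem.List.pyGetD row 3 0
      boxes ++ [(patchIdxi,
                 [patchIdxDim0, patchIdxDim1, patchIdxDim2],
                 [patchIdxDim0 + PySem.List.pyGetD patch_shape 0 0,
                  patchIdxDim1 + PySem.List.pyGetD patch_shape 1 0,
                  patchIdxDim2 + PySem.List.pyGetD patch_shape 2 0])]) boxes
  else boxes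

-- ===== PORT B =====
-- Python zip(*xss): the columns, stopping at the shortest row (fuel = first row's length suffices).
def pvZipStarAux : Nat → List (List Int) → List (List Int)
  | 0, _ => []
  | n+1, xss =>
    if xss.any (fun r => r.isEmpty) then []
    else (xss.map (fun r => r.headD 0)) :: pvZipStarAux n (xss.map List.tail)

def pvZipStar (xss : List (List Int)) : List (List Int) :=
  match xss with
  | [] => []
  | x :: _ => pvZipStarAux x.length xss

def generate_boxes_given_startIdxes_alt (startIdxes : List (List Int)) (patch_shape : List Int) : List (Int × List Int × List Int) :=
  let dims : Int := PySem.List.len (PySem.List.pyGetD startIdxes 0 []) - 1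
  if dims ≠ 2 ∧ dims ≠ 3 then []
  else
    let cols := pvZipStar (startIdxes.map (fun row => PySem.List.slice row none (some (dims + 1))))
    let ids := PySem.List.pyGetD cols 0 []
    let tlCols := PySem.List.slice cols (some 1) none
    let brCols := (PySem.List.enumerate tlCols).map
      (fun dc => dc.2.map (fun v => v + PySem.List.pyGetD patch_shape dc.1 0))
    let tls := pvZipStar tlCols
    let brs := pvZipStar brCols
    ids.zip (tls.zip brs)

-- ===== PRECONDITION & SPEC =====
-- Pre_ excludes exactly the inputs on which A raises IndexError: empty startIdxes, or a
-- recognised dimensionality (first row of length 3 or 4) with some row or patch_shape too short.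
def Pre_generate_boxes_given_startIdxes (startIdxes : List (List Int)) (patch_shape : List Int) : Prop :=
  startIdxes ≠ [] ∧
  ((startIdxes.headD []).length = 3 ∨ (startIdxes.headD []).length = 4 →
    (∀ row ∈ startIdxes, (startIdxes.headD []).length ≤ row.length) ∧
    (startIdxes.headD []).length - 1 ≤ patch_shape.length)
instance (startIdxes : List (List Int)) (patch_shape : List Int) : Decidable (Pre_generate_boxes_given_startIdxes startIdxes patch_shape) := by unfold Pre_generate_boxes_given_startIdxes; infer_instance

def pvWitness_generate_boxes_given_startIdxes : List (List Int) × List Int :=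
  ([[0, 1, 2], [7, 3, 4]], [10, 20])

def Spec_generate_boxes_given_startIdxes (startIdxes : List (List Int)) (patch_shape : List Int) (out : List (Int × List Int × List Int)) : Prop := out = generate_boxes_given_startIdxes_alt startIdxes patch_shape
instance (startIdxes : List (List Int)) (patch_shape : List Int) (out : List (Int × List Int × List Int)) : Decidable (Spec_generate_boxes_given_startIdxes startIdxes patch_shape out) := by unfold Spec_generate_boxes_given_startIdxes; infer_instance

-- ===== CLAIM (what is proved, stated in full; the proofs are below) =====
def Claim_equal_generate_boxes_given_startIdxes : Prop := ∀ (startIdxes : List (List Int)) (patch_shape : List Int), Dom_generate_boxes_given_startIdxes startIdxes patch_shape → Pre_generate_boxes_given_startIdxes startIdxes patch_shape → Spec_generate_boxes_given_startIdxes startIdxes patch_shape (generate_boxes_given_startIdxes startIdxes patch_shape)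

-- ===== LEMMAS AND PROOFS =====

-- zip(*) on a table whose rows all have length n: the i-th output row collects the i-th entries.
theorem pvZipStarAux_width (n : Nat) (xss : List (List Int))
    (h : ∀ r ∈ xss, r.length = n) :
    pvZipStarAux n xss = (List.range n).map (fun i => xss.map (fun r => r.getD i 0)) := by
  induction n generalizing xss with
  | zero => simp [pvZipStarAux]
  | succ n ih =>
    have hne : xss.any (fun r => r.isEmpty) = false := by
      simp only [List.any_eq_false]
      intro r hr
      have := h r hr
      cases r with
      | nil => simp at this
      | cons a l => simp
    rw [pvZipStarAux, if_neg (by simp [hne])]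
    rw [ih (xss.map List.tail) (by
      intro r hr
      obtain ⟨r0, hr0, rfl⟩ := List.mem_map.mp hr
      have := h r0 hr0
      cases r0 with
      | nil => simp at this
      | cons a l => simpa using this)]
    rw [List.range_succ_eq_map]
    simp only [List.map_cons, List.map_map]
    refine congrArg₂ List.cons ?_ ?_
    · exact List.map_congr_left (fun r _ => by cases r <;> simp)
    · refine List.map_congr_left (fun i _ => ?_)
      simp only [Function.comp]
      exact List.map_congr_left (fun r _ => by cases r <;> simp)

theorem pvZipStar_width (n : Nat) (xss : List (List Int)) (hne : xss ≠ [])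
    (h : ∀ r ∈ xss, r.length = n) :
    pvZipStar xss = (List.range n).map (fun i => xss.map (fun r => r.getD i 0)) := by
  cases xss with
  | nil => exact absurd rfl hne
  | cons x t =>
    have hx : x.length = n := h x List.mem_cons_self
    rw [pvZipStar, hx]
    exact pvZipStarAux_width n (x :: t) h

-- zip(*) of two equal-length columns is the elementwise pairing.
theorem pv_zipStar_two (u v : List Int) (h : v.length = u.length) :
    pvZipStar [u, v] = (u.zip v).map (fun p => [p.1, p.2]) := by
  have hs : pvZipStar [u, v] = pvZipStarAux u.length [u, v] := rfl
  rw [hs]; clear hs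
  induction u generalizing v with
  | nil => simp [pvZipStarAux]
  | cons a u ih =>
    cases v with
    | nil => simp at h
    | cons b v =>
      simp only [List.length_cons]
      rw [pvZipStarAux, if_neg (by simp)]
      simp only [List.map_cons, List.map_nil, List.headD_cons, List.tail_cons]
      rw [ih v (by simpa using h)]
      simp

-- zip(*) of three equal-length columns.
theorem pv_zipStar_three (u v w : List Int) (hv : v.length = u.length) (hw : w.length = u.length) :
    pvZipStar [u, v, w] = (u.zip (v.zip w)).map (fun p => [p.1, p.2.1, p.2.2]) := by
  have hs : pvZipStar [u, v, w] = pvZipStarAux u.length [u, v, w] := rfl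
  rw [hs]; clear hs
  induction u generalizing v w with
  | nil => simp [pvZipStarAux]
  | cons a u ih =>
    cases v with
    | nil => simp at hv
    | cons b v =>
      cases w with
      | nil => simp at hw
      | cons c w =>
        simp only [List.length_cons]
        rw [pvZipStarAux, if_neg (by simp)]
        simp only [List.map_cons, List.map_nil, List.headD_cons, List.tail_cons]
        rw [ih v w (by simpa using hv) (by simpa using hw)]
        simp

-- A's 2D branch is the per-row map.
theorem pv_A2 (S : List (List Int)) (ps : List Int)
    (h2 : PySem.List.len (PySem.List.pyGetD S 0 ([] : List Int)) - 1 = 2) :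
    generate_boxes_given_startIdxes S ps = S.map (fun row =>
      (PySem.List.pyGetD row 0 0,
       [PySem.List.pyGetD row 1 0, PySem.List.pyGetD row 2 0],
       [PySem.List.pyGetD row 1 0 + PySem.List.pyGetD ps 0 0,
        PySem.List.pyGetD row 2 0 + PySem.List.pyGetD ps 1 0])) := by
  unfold generate_boxes_given_startIdxes
  rw [if_pos h2]
  rw [PySem.List.foldl_pyRange_zero_pyGetD S []
      (fun boxes row =>
        boxes ++ [(PySem.List.pyGetD row 0 0,
                   [PySem.List.pyGetD row 1 0, PySem.List.pyGetD row 2 0],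
                   [PySem.List.pyGetD row 1 0 + PySem.List.pyGetD ps 0 0,
                    PySem.List.pyGetD row 2 0 + PySem.List.pyGetD ps 1 0])]) []]
  rw [PySem.List.foldl_append_singleton_eq_map]
  simp

-- A's 3D branch is the per-row map.
theorem pv_A3 (S : List (List Int)) (ps : List Int)
    (h2 : ¬ (PySem.List.len (PySem.List.pyGetD S 0 ([] : List Int)) - 1 = 2))
    (h3 : PySem.List.len (PySem.List.pyGetD S 0 ([] : List Int)) - 1 = 3) :
    generate_boxes_given_startIdxes S ps = S.map (fun row =>
      (PySem.List.pyGetD row 0 0,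
       [PySem.List.pyGetD row 1 0, PySem.List.pyGetD row 2 0, PySem.List.pyGetD row 3 0],
       [PySem.List.pyGetD row 1 0 + PySem.List.pyGetD ps 0 0,
        PySem.List.pyGetD row 2 0 + PySem.List.pyGetD ps 1 0,
        PySem.List.pyGetD row 3 0 + PySem.List.pyGetD ps 2 0])) := by
  unfold generate_boxes_given_startIdxes
  rw [if_neg h2, if_pos h3]
  rw [PySem.List.foldl_pyRange_zero_pyGetD S []
      (fun boxes row =>
        boxes ++ [(PySem.List.pyGetD row 0 0,
                   [PySem.List.pyGetD row 1 0, PySem.List.pyGetD row 2 0, PySem.List.pyGetD row 3 0],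
                   [PySem.List.pyGetD row 1 0 + PySem.List.pyGetD ps 0 0,
                    PySem.List.pyGetD row 2 0 + PySem.List.pyGetD ps 1 0,
                    PySem.List.pyGetD row 3 0 + PySem.List.pyGetD ps 2 0])]) []]
  rw [PySem.List.foldl_append_singleton_eq_map]
  simp

-- B's column-wise pipeline, 2D case, collapsed to the per-row map.
theorem pv_B2 (h0 : List Int) (t : List (List Int)) (ps : List Int)
    (h3 : h0.length = 3) (hrows : ∀ r ∈ h0 :: t, 3 ≤ r.length) :
    generate_boxes_given_startIdxes_alt (h0 :: t) ps =
      (h0 :: t).map (fun row =>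
        (((row.take 3).getD 0 0 : Int),
         [(row.take 3).getD 1 0, (row.take 3).getD 2 0],
         [(row.take 3).getD 1 0 + PySem.List.pyGetD ps 0 0,
          (row.take 3).getD 2 0 + PySem.List.pyGetD ps 1 0])) := by
  have hd : PySem.List.len h0 - 1 = (2 : Int) := by simp [PySem.List.len, h3]
  simp only [generate_boxes_given_startIdxes_alt, PySem.List.pyGetD_zero_cons, hd]
  rw [if_neg (by norm_num)]
  simp only [show (2 : Int) + 1 = 3 from by norm_num]
  have hsl : ((h0 :: t).map (fun row => PySem.List.slice row none (some (3 : Int)))) =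
      (h0 :: t).map (fun row => row.take ((3 : Int)).toNat) :=
    List.map_congr_left (fun r _ => PySem.List.slice_to r (by norm_num))
  rw [hsl]
  simp only [show ((3 : Int)).toNat = 3 from rfl]
  rw [pvZipStar_width 3 _ (by simp) (by
    intro r hr
    obtain ⟨r0, hr0, rfl⟩ := List.mem_map.mp hr
    have := hrows r0 hr0
    simp only [List.length_take]
    omega)]
  rw [show List.range 3 = [0, 1, 2] from rfl]
  simp only [List.map_cons, List.map_nil, List.map_map]
  rw [PySem.List.pyGetD_zero_cons, PySem.List.slice_from_one]
  simp only [List.tail_cons]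
  simp only [PySem.List.enumerate_cons, PySem.List.enumerate_nil, List.map_cons, List.map_nil]
  rw [pv_zipStar_two _ _ (by simp)]
  rw [pv_zipStar_two _ _ (by simp)]
  simp [List.zip_map']

-- B's column-wise pipeline, 3D case, collapsed to the per-row map.
theorem pv_B3 (h0 : List Int) (t : List (List Int)) (ps : List Int)
    (h4 : h0.length = 4) (hrows : ∀ r ∈ h0 :: t, 4 ≤ r.length) :
    generate_boxes_given_startIdxes_alt (h0 :: t) ps =
      (h0 :: t).map (fun row =>
        (((row.take 4).getD 0 0 : Int),
         [(row.take 4).getD 1 0, (row.take 4).getD 2 0, (row.take 4).getD 3 0],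
         [(row.take 4).getD 1 0 + PySem.List.pyGetD ps 0 0,
          (row.take 4).getD 2 0 + PySem.List.pyGetD ps 1 0,
          (row.take 4).getD 3 0 + PySem.List.pyGetD ps 2 0])) := by
  have hd : PySem.List.len h0 - 1 = (3 : Int) := by simp [PySem.List.len, h4]
  simp only [generate_boxes_given_startIdxes_alt, PySem.List.pyGetD_zero_cons, hd]
  rw [if_neg (by norm_num)]
  simp only [show (3 : Int) + 1 = 4 from by norm_num]
  have hsl : ((h0 :: t).map (fun row => PySem.List.slice row none (some (4 : Int)))) =
      (h0 :: t).map (fun row => row.take ((4 : Int)).toNat) :=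
    List.map_congr_left (fun r _ => PySem.List.slice_to r (by norm_num))
  rw [hsl]
  simp only [show ((4 : Int)).toNat = 4 from rfl]
  rw [pvZipStar_width 4 _ (by simp) (by
    intro r hr
    obtain ⟨r0, hr0, rfl⟩ := List.mem_map.mp hr
    have := hrows r0 hr0
    simp only [List.length_take]
    omega)]
  rw [show List.range 4 = [0, 1, 2, 3] from rfl]
  simp only [List.map_cons, List.map_nil, List.map_map]
  rw [PySem.List.pyGetD_zero_cons, PySem.List.slice_from_one]
  simp only [List.tail_cons]
  simp only [PySem.List.enumerate_cons, PySem.List.enumerate_nil, List.map_cons, List.map_nil]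
  rw [pv_zipStar_three _ _ _ (by simp) (by simp)]
  rw [pv_zipStar_three _ _ _ (by simp) (by simp)]
  simp [List.zip_map']

-- ===== VERDICT (by name: the statement is the Claim_ definition above) =====
set_option maxHeartbeats 1000000 in
theorem generate_boxes_given_startIdxes_spec : Claim_equal_generate_boxes_given_startIdxes := by
  intro S ps _ hpre
  obtain ⟨hne, hlen⟩ := hpre
  obtain ⟨h0, t, rfl⟩ : ∃ h0 t, S = h0 :: t := by
    cases S with
    | nil => exact absurd rfl hne
    | cons h0 t => exact ⟨h0, t, rfl⟩
  simp only [List.headD_cons] at hlen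
  unfold Spec_generate_boxes_given_startIdxes
  by_cases h3 : h0.length = 3
  · obtain ⟨hrows, hps⟩ := hlen (Or.inl h3)
    simp only [h3] at hrows
    rw [pv_A2 _ ps (by simp [PySem.List.len, h3]),
        pv_B2 h0 t ps h3 hrows]
    refine List.map_congr_left (fun r hr => ?_)
    simp [pysem]
  · by_cases h4 : h0.length = 4
    · obtain ⟨hrows, hps⟩ := hlen (Or.inr h4)
      simp only [h4] at hrows
      rw [pv_A3 _ ps (by simp [PySem.List.len, h4]) (by simp [PySem.List.len, h4]),
          pv_B3 h0 t ps h4 hrows]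
      refine List.map_congr_left (fun r hr => ?_)
      simp [pysem]
    · have hc2 : ¬ (PySem.List.len (PySem.List.pyGetD (h0 :: t) 0 ([] : List Int)) - 1 = 2) := by
        rw [PySem.List.pyGetD_zero_cons]; simp [PySem.List.len]; omega
      have hc3 : ¬ (PySem.List.len (PySem.List.pyGetD (h0 :: t) 0 ([] : List Int)) - 1 = 3) := by
        rw [PySem.List.pyGetD_zero_cons]; simp [PySem.List.len]; omega
      unfold generate_boxes_given_startIdxes generate_boxes_given_startIdxes_alt
      rw [if_neg hc2, if_neg hc3, if_pos ⟨hc2, hc3⟩]
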